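-- pv_equiv track=rewrite | github.com/Wulfic/Cicada3301 | LiberPrimus/tools/crack_vigenere_parallel.py | score_text
-- ===== SOURCE A (Python) =====
-- TRIGRAMS = {
--     'THE': 18, 'AND': 7, 'ING': 7, 'HER': 3, 'THA': 6, 'ERE': 3,
--     'FOR': 3, 'ENT': 4, 'ION': 4, 'TER': 2, 'WAS': 4, 'YOU': 3,
--     'ITH': 3, 'VER': 2, 'ALL': 2, 'WIT': 2, 'THI': 3, 'TIO': 3
-- }
--
-- def score_text(text):
--     # Count trigrams
--     score = 0
--     l = len(text)
--     if l < 3: return 0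
--
--     for i in range(l - 2):
--         tri = text[i:i+3]
--         if tri in TRIGRAMS:
--             score += TRIGRAMS[tri]
--
--     return score
-- ===== SOURCE B (Python) =====
-- TRIGRAMS = {
--     'THE': 18, 'AND': 7, 'ING': 7, 'HER': 3, 'THA': 6, 'ERE': 3,
--     'FOR': 3, 'ENT': 4, 'ION': 4, 'TER': 2, 'WAS': 4, 'YOU': 3,
--     'ITH': 3, 'VER': 2, 'ALL': 2, 'WIT': 2, 'THI': 3, 'TIO': 3
-- }
--
-- def score_text(text):
--     # Tally every 3-char window once, then sum weight * multiplicity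
--     # over the known trigram table.
--     counts = {}
--     for i in range(len(text) - 2):
--         tri = text[i:i+3]
--         counts[tri] = counts.get(tri, 0) + 1
--     return sum(w * counts.get(tri, 0) for tri, w in TRIGRAMS.items())
-- ===== Notes on version B (the rewrite author's own statement) =====
-- stated objective: alternative
-- what changed: Instead of scanning the text and testing each window's membership in TRIGRAMS, B tallies all 3-char windows into a dict in one pass and then sums weight * count over the TRIGRAMS items; the len(text) < 3 guard disappears because the empty window loop yields zero counts.
import Mathlib
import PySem

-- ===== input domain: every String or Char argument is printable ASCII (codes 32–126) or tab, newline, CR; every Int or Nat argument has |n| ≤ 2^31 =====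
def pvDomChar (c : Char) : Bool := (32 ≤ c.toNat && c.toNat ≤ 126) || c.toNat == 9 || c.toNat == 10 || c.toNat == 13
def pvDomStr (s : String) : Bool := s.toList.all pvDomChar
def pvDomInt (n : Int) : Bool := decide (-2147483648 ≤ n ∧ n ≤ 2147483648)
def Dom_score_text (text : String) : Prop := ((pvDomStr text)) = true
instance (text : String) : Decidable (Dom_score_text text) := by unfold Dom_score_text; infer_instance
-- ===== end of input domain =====

-- B tallies every 3-char window into a dict once and then sums weight * count
-- over the trigram table (alternative decomposition; same cost).

-- ===== PORT A =====
def TRIGRAMS : PySem.Dict String Int := PySem.Dict.ofList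
  [("THE", 18), ("AND", 7), ("ING", 7), ("HER", 3), ("THA", 6), ("ERE", 3),
   ("FOR", 3), ("ENT", 4), ("ION", 4), ("TER", 2), ("WAS", 4), ("YOU", 3),
   ("ITH", 3), ("VER", 2), ("ALL", 2), ("WIT", 2), ("THI", 3), ("TIO", 3)]

def score_text (text : String) : Int :=
  let score : Int := 0
  let l : Int := PySem.Str.len text
  if l < 3 then 0 else
    (PySem.List.pyRange 0 (l - 2) 1).foldl
      (fun score i =>
        let tri := PySem.Str.slice text (some i) (some (i + 3))
        if TRIGRAMS.contains tri then score + TRIGRAMS.getD tri 0 else score)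
      score

-- ===== PORT B =====
def score_text_alt (text : String) : Int :=
  let counts : PySem.Dict String Int :=
    (PySem.List.pyRange 0 (PySem.Str.len text - 2) 1).foldl
      (fun d i =>
        let tri := PySem.Str.slice text (some i) (some (i + 3))
        d.insert tri (d.getD tri 0 + 1))
      PySem.Dict.empty
  TRIGRAMS.items.foldl (fun s p => s + p.2 * counts.getD p.1 0) 0

-- ===== PRECONDITION & SPEC =====
def Spec_score_text (text : String) (out : Int) : Prop := out = score_text_alt text
instance (text : String) (out : Int) : Decidable (Spec_score_text text out) := by unfold Spec_score_text; infer_instance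

-- ===== CLAIM (what is proved, stated in full; the proofs are below) =====
def Claim_equal_score_text : Prop := ∀ (text : String), Dom_score_text text → Spec_score_text text (score_text text)

-- ===== LEMMAS AND PROOFS =====

-- sum of 0/1-indicator-weighted values over an association list with distinct
-- keys is exactly the dictionary lookup (default 0)
lemma sum_indicator (ps : List (String × Int)) (hnd : (ps.map Prod.fst).Nodup) (x : String) :
    (ps.map (fun p => p.2 * (if p.1 = x then 1 else 0))).sum
      = (PySem.Dict.mk ps).getD x 0 := by
  induction ps with
  | nil => simp [PySem.Dict.getD, PySem.Dict.get?]
  | cons p rest ih =>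
    obtain ⟨k, v⟩ := p
    simp only [List.map_cons, List.sum_cons]
    rw [PySem.Dict.getD_eq_get?_getD, PySem.Dict.get?_mk_cons]
    simp only [List.map_cons, List.nodup_cons] at hnd
    by_cases hk : k = x
    · subst hk
      have hz : (rest.map (fun p => p.2 * (if p.1 = k then 1 else 0))).sum = 0 := by
        apply List.sum_eq_zero
        intro y hy
        simp only [List.mem_map] at hy
        obtain ⟨q, hq, rfl⟩ := hy
        have hq1 : q.1 ≠ k := fun h => hnd.1 (h ▸ List.mem_map_of_mem hq)
        simp [hq1]
      rw [if_pos rfl, mul_one, hz, add_zero]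
      simp
    · have hb : (k == x) = false := beq_eq_false_iff_ne.mpr hk
      rw [if_neg hk, mul_zero, zero_add, hb]
      simp only [Bool.false_eq_true, if_false]
      rw [← PySem.Dict.getD_eq_get?_getD]
      simpa using ih hnd.2

-- main combinatorial fact: summing d.getD over a list of windows equals
-- summing weight * count over d's items, for a dict with distinct keys
lemma sum_getD_eq_sum_count (d : PySem.Dict String Int) (hnd : d.keys.Nodup)
    (ws : List String) :
    (ws.map (fun t => d.getD t 0)).sum
      = (d.items.map (fun p => p.2 * (ws.count p.1 : Int))).sum := by
  induction ws with
  | nil => simp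
  | cons x rest ih =>
    simp only [List.map_cons, List.sum_cons]
    have hcnt : ∀ p : String × Int,
        p.2 * ((x :: rest).count p.1 : Int)
          = p.2 * (rest.count p.1 : Int) + p.2 * (if p.1 = x then 1 else 0) := by
      intro p
      rw [List.count_cons]
      by_cases h : p.1 = x
      · simp only [h, beq_self_eq_true, if_true]
        push_cast
        ring
      · have hb : (x == p.1) = false := beq_eq_false_iff_ne.mpr (Ne.symm h)
        simp only [hb, if_neg h, Bool.false_eq_true, if_false]
        push_cast
        ring
    calc d.getD x 0 + (rest.map (fun t => d.getD t 0)).sum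
        = (d.items.map (fun p => p.2 * (rest.count p.1 : Int))).sum
            + (d.items.map (fun p => p.2 * (if p.1 = x then 1 else 0))).sum := by
          rw [ih]
          have : (d.items.map (fun p => p.2 * (if p.1 = x then 1 else 0))).sum
              = d.getD x 0 := by
            have h1 : (d.items.map Prod.fst).Nodup := hnd
            have h2 := sum_indicator d.items h1 x
            simpa using h2
          omega
      _ = (d.items.map (fun p => p.2 * ((x :: rest).count p.1 : Int))).sum := by
          rw [← List.sum_map_add]
          congr 1
          apply List.map_congr_left
          intro p _
          exact (hcnt p).symm

lemma trigrams_keys_nodup : TRIGRAMS.keys.Nodup := by decide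

-- ===== VERDICT (by name: the statement is the Claim_ definition above) =====
theorem score_text_spec : Claim_equal_score_text := by
  intro text _
  unfold Spec_score_text score_text score_text_alt
  simp only []
  set f : Int → String := fun i => PySem.Str.slice text (some i) (some (i + 3)) with hf
  set R : List Int := PySem.List.pyRange 0 (PySem.Str.len text - 2) 1 with hR
  have hws : ∀ (init : PySem.Dict String Int),
      R.foldl (fun d i => d.insert (f i) (d.getD (f i) 0 + 1)) init
        = (R.map f).foldl (fun d t => d.insert t (d.getD t 0 + 1)) init := by
    intro init; rw [List.foldl_map]
  -- B's value
  have hB : TRIGRAMS.items.foldl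
      (fun s p => s + p.2 *
        (R.foldl (fun d i => d.insert (f i) (d.getD (f i) 0 + 1)) PySem.Dict.empty).getD p.1 0) 0
      = (TRIGRAMS.items.map (fun p => p.2 * ((R.map f).count p.1 : Int))).sum := by
    rw [PySem.List.foldl_add]
    simp only [zero_add]
    congr 1
    apply List.map_congr_left
    intro p _
    rw [hws, PySem.Dict.getD_foldl_insert_add_one, PySem.Dict.getD_empty]
    ring
  -- A's value (when the loop runs at all)
  have hA : R.foldl
      (fun score i => if TRIGRAMS.contains (f i) then score + TRIGRAMS.getD (f i) 0 else score) 0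
      = ((R.map f).map (fun t => TRIGRAMS.getD t 0)).sum := by
    have hstep : ∀ (s : Int) (i : Int),
        (if TRIGRAMS.contains (f i) then s + TRIGRAMS.getD (f i) 0 else s)
          = s + TRIGRAMS.getD (f i) 0 := by
      intro s i
      by_cases h : TRIGRAMS.contains (f i)
      · rw [if_pos h]
      · rw [if_neg h, PySem.Dict.getD_of_not_contains _ _ (by simpa using h), add_zero]
    calc R.foldl (fun s i => if TRIGRAMS.contains (f i) then s + TRIGRAMS.getD (f i) 0 else s) 0
        = R.foldl (fun s i => s + TRIGRAMS.getD (f i) 0) 0 := by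
          exact PySem.List.foldl_congr_mem _ _ _ _ (fun s i _ => hstep s i)
      _ = ((R.map f).map (fun t => TRIGRAMS.getD t 0)).sum := by
          rw [PySem.List.foldl_add, List.map_map]
          simp only [zero_add, Function.comp_def]
  have hkey := sum_getD_eq_sum_count TRIGRAMS trigrams_keys_nodup (R.map f)
  by_cases hl : PySem.Str.len text < 3
  · -- short text: A returns 0 directly; B's range is empty
    rw [if_pos hl]
    have hRnil : R = [] := by
      rw [hR]; apply PySem.List.pyRange_one_eq_nil
      have hn : (0:Int) ≤ PySem.Str.len text := by simp [PySem.Str.len_eq]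
      omega
    rw [hB, hRnil]
    simp
  · rw [if_neg hl, hA, hB, hkey]
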